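-- pv_equiv track=rewrite | github.com/chminipark/algorithm | Programmers/kakao/2019 카카오 개발자 겨울 인턴십/징검다리건너기.py | check
-- ===== SOURCE A (Python) =====
-- def check(stones, mid, k):
--     possible = k
--
--     for s in stones:
--         if s - mid <= 0:
--             possible -= 1
--             if possible == 0:
--                 return False
--         else:
--             possible = k
--     return True
-- ===== SOURCE B (Python) =====
-- def check(stones, mid, k):
--     # jump power k <= 0 can never be exhausted (A's countdown never hits exactly 0)
--     if k <= 0:
--         return True
--     n = len(stones)
--     # indices of stones still usable at level mid, with sentinels for the two banks
--     bounds = [-1] + [i for i, s in enumerate(stones) if s - mid > 0] + [n]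
--     # crossable iff every gap between consecutive usable positions is shorter than k
--     return all(b - a - 1 < k for a, b in zip(bounds, bounds[1:]))
-- ===== Notes on version B (the rewrite author's own statement) =====
-- stated objective: alternative
-- what changed: A scans once with a countdown budget that resets on usable stones and early-returns False; B first builds the list of indices of usable stones (plus bank sentinels -1 and n) and then checks that every gap between consecutive usable positions is < k.
import Mathlib
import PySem

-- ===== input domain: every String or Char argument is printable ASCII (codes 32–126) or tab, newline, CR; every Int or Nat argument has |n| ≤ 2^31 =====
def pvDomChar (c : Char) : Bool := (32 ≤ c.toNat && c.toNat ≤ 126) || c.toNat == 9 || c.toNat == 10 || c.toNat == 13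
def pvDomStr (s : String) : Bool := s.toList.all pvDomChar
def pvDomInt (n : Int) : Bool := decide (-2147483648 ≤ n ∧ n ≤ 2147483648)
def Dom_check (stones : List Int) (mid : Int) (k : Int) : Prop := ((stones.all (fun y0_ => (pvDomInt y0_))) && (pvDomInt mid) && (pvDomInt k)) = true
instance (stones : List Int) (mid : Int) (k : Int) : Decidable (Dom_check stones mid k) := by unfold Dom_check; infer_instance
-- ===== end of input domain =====

-- B replaces A's countdown-budget scan with a staged computation: first the list of indices
-- of usable stones (with bank sentinels), then a gap check between consecutive usable positions
-- (alternative algorithm, same O(n)).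

-- ===== PORT A =====
-- the for-loop with its early `return False`, as structural recursion over stones carrying `possible`
def checkLoop (stones : List Int) (mid : Int) (k : Int) (possible : Int) : Bool :=
  match stones with
  | [] => true
  | s :: rest =>
      if s - mid ≤ 0 then
        if possible - 1 = 0 then false
        else checkLoop rest mid k (possible - 1)
      else checkLoop rest mid k k

def check (stones : List Int) (mid : Int) (k : Int) : Bool :=
  checkLoop stones mid k k

-- ===== PORT B =====
-- the comprehension `[i for i, s in enumerate(stones) if s - mid > 0]`, carrying the index
def openIdxFrom (mid : Int) (i : Int) : List Int → List Int
  | [] => []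
  | s :: rest => if s - mid > 0 then i :: openIdxFrom mid (i + 1) rest
                 else openIdxFrom mid (i + 1) rest

def check_alt (stones : List Int) (mid : Int) (k : Int) : Bool :=
  if k ≤ 0 then true
  else
    let n : Int := (stones.length : Int)
    let bounds : List Int := -1 :: openIdxFrom mid 0 stones ++ [n]
    -- all(b - a - 1 < k for a, b in zip(bounds, bounds[1:]))
    (bounds.zip bounds.tail).all (fun p => decide (p.2 - p.1 - 1 < k))

-- ===== PRECONDITION & SPEC =====
def Spec_check (stones : List Int) (mid : Int) (k : Int) (out : Bool) : Prop := out = check_alt stones mid k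
instance (stones : List Int) (mid : Int) (k : Int) (out : Bool) : Decidable (Spec_check stones mid k out) := by unfold Spec_check; infer_instance

-- ===== CLAIM (what is proved, stated in full; the proofs are below) =====
def Claim_equal_check : Prop := ∀ (stones : List Int) (mid : Int) (k : Int), Dom_check stones mid k → Spec_check stones mid k (check stones mid k)

-- ===== LEMMAS AND PROOFS =====

-- proof-side intermediate: B's zip-all over the bounds list, as a recursion carrying
-- the current index i and the last usable position a
def gapLoop (mid k : Int) (stones : List Int) (i a : Int) : Bool :=
  match stones with
  | [] => decide (i - a - 1 < k)
  | s :: rest =>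
      if s - mid > 0 then decide (i - a - 1 < k) && gapLoop mid k rest (i + 1) i
      else gapLoop mid k rest (i + 1) a

-- proof-side intermediate: maximal-run fold (run so far, best run)
def bStep (mid : Int) (st : Int × Int) (s : Int) : Int × Int :=
  if s ≤ mid then
    let r := st.1 + 1
    (r, if r > st.2 then r else st.2)
  else (0, st.2)

-- the `best` component of the fold never decreases
theorem bfold_best_mono (mid : Int) (stones : List Int) (run best : Int) :
    best ≤ (stones.foldl (bStep mid) (run, best)).2 := by
  induction stones generalizing run best with
  | nil => simp
  | cons s rest ih =>
      have hb : bStep mid (run, best) s =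
          if s ≤ mid then (run + 1, if run + 1 > best then run + 1 else best)
          else (0, best) := rfl
      rw [List.foldl_cons, hb]
      split_ifs with h1 h2
      · exact le_trans (le_of_lt h2) (ih (run + 1) (run + 1))
      · exact ih (run + 1) best
      · exact ih 0 best

-- with k ≤ 0 A's countdown never reaches 0
theorem checkLoop_nonpos (stones : List Int) (mid k possible : Int)
    (hk : k ≤ 0) (hp : possible ≤ 0) : checkLoop stones mid k possible = true := by
  induction stones generalizing possible with
  | nil => rfl
  | cons s rest ih =>
      simp only [checkLoop]
      split_ifs with h1 h2
      · omega
      · exact ih (possible - 1) (by omega)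
      · exact ih k hk

-- A-side invariant: budget `possible` left, current run `run`, best so far `best`
theorem checkLoop_eq (mid k : Int) (stones : List Int) (possible run best : Int)
    (hpos : 0 < possible) (hrun : 0 ≤ run) (hsum : possible + run = k) (hbest : best < k) :
    checkLoop stones mid k possible =
      decide ((stones.foldl (bStep mid) (run, best)).2 < k) := by
  induction stones generalizing possible run best with
  | nil => simp [checkLoop, hbest]
  | cons s rest ih =>
      have hb : bStep mid (run, best) s =
          if s ≤ mid then (run + 1, if run + 1 > best then run + 1 else best)
          else (0, best) := rfl
      simp only [checkLoop, List.foldl_cons, hb]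
      have hs : (s - mid ≤ 0) ↔ (s ≤ mid) := by omega
      by_cases h1 : s ≤ mid
      · rw [if_pos (hs.mpr h1), if_pos h1]
        by_cases h2 : possible - 1 = 0
        · rw [if_pos h2]
          have hgt : run + 1 > best := by omega
          simp only [if_pos hgt]
          have := bfold_best_mono mid rest (run + 1) (run + 1)
          have : ¬ (rest.foldl (bStep mid) (run + 1, run + 1)).2 < k := by omega
          simp [this]
        · rw [if_neg h2]
          have hb' : (if run + 1 > best then run + 1 else best) < k := by
            split_ifs <;> omega
          exact ih (possible - 1) (run + 1) _ (by omega) (by omega) (by omega) hb'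
      · rw [if_neg (fun h => h1 (hs.mp h)), if_neg h1]
        exact ih k 0 best (by omega) (by omega) (by omega) hbest

-- once the current gap already reaches k, the gap check must fail
theorem gapLoop_false (mid k : Int) (stones : List Int) (i a : Int)
    (h : k ≤ i - a - 1) : gapLoop mid k stones i a = false := by
  induction stones generalizing i a with
  | nil => simp [gapLoop]; omega
  | cons s rest ih =>
      simp only [gapLoop]
      split_ifs with h1
      · have : ¬ (i - a - 1 < k) := by omega
        simp [this]
      · exact ih (i + 1) a (by omega)

-- B-side invariant: gapLoop agrees with the maximal-run fold
theorem gapLoop_eq (mid k : Int) (stones : List Int) (i a run best : Int)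
    (hrun : run = i - a - 1) (h0 : 0 ≤ run) (hrb : run ≤ best) (hbk : best < k) :
    gapLoop mid k stones i a =
      decide ((stones.foldl (bStep mid) (run, best)).2 < k) := by
  induction stones generalizing i a run best with
  | nil =>
      simp [gapLoop]
      omega
  | cons s rest ih =>
      have hb : bStep mid (run, best) s =
          if s ≤ mid then (run + 1, if run + 1 > best then run + 1 else best)
          else (0, best) := rfl
      simp only [gapLoop, List.foldl_cons, hb]
      by_cases h1 : s - mid > 0
      · rw [if_pos h1, if_neg (by omega : ¬ s ≤ mid)]
        have : (i - a - 1 < k) := by omega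
        simp only [this, decide_true, Bool.true_and]
        exact ih (i + 1) i 0 best (by omega) (by omega) (by omega) hbk
      · rw [if_neg h1, if_pos (by omega : s ≤ mid)]
        by_cases h2 : run + 1 < k
        · have hb' : (if run + 1 > best then run + 1 else best) < k := by
            split_ifs <;> omega
          have hrb' : run + 1 ≤ (if run + 1 > best then run + 1 else best) := by
            split_ifs <;> omega
          exact ih (i + 1) a (run + 1) _ (by omega) (by omega) hrb' hb'
        · have hgt : run + 1 > best := by omega
          simp only [if_pos hgt]
          have := bfold_best_mono mid rest (run + 1) (run + 1)
          have hnot : ¬ (rest.foldl (bStep mid) (run + 1, run + 1)).2 < k := by omega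
          simp [hnot]
          exact gapLoop_false mid k rest (i + 1) a (by omega)

-- B's zip-all over the bounds list equals gapLoop
theorem bounds_eq_gapLoop (mid k : Int) (stones : List Int) (i a : Int) :
    (((a :: openIdxFrom mid i stones ++ [i + (stones.length : Int)]).zip
        (a :: openIdxFrom mid i stones ++ [i + (stones.length : Int)]).tail).all
      (fun p => decide (p.2 - p.1 - 1 < k))) = gapLoop mid k stones i a := by
  induction stones generalizing i a with
  | nil => simp [openIdxFrom, gapLoop]
  | cons s rest ih =>
      simp only [openIdxFrom, gapLoop]
      have hlen : i + ((s :: rest).length : Int) = (i + 1) + (rest.length : Int) := by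
        simp; omega
      rw [hlen]
      split_ifs with h1
      · have ih' := ih (i + 1) i
        simp only [List.cons_append, List.tail_cons, List.zip_cons_cons, List.all_cons] at ih' ⊢
        rw [ih']
      · have ih' := ih (i + 1) a
        simp only [List.cons_append, List.tail_cons] at ih' ⊢
        rw [ih']

-- ===== VERDICT (by name: the statement is the Claim_ definition above) =====
theorem check_spec : Claim_equal_check := by
  intro stones mid k _
  unfold Spec_check check check_alt
  by_cases hk : k ≤ 0
  · rw [if_pos hk]
    exact checkLoop_nonpos stones mid k k hk hk
  · rw [if_neg hk]
    have hB := bounds_eq_gapLoop mid k stones 0 (-1)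
    simp only [zero_add] at hB
    rw [hB]
    rw [checkLoop_eq mid k stones k 0 0 (by omega) (by omega) (by omega) (by omega),
        gapLoop_eq mid k stones 0 (-1) 0 0 (by omega) (by omega) (by omega) (by omega)]
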